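-- pv_equiv track=rewrite | github.com/charlesb990/Python-Projects | Game_Anno_1800/Anno_1800.py | calculate_building_ratio
-- ===== SOURCE A (Python) =====
-- def calculate_building_ratio(production_times):
--   """Calculates building ratio based on production times."""
--   # Find the shortest production time (building 1)
--   shortest_time = min(production_times)
--   building_1_indices = []
--   # Find all building indices with the shortest production time
--   for i, time in enumerate(production_times):
--     if time == shortest_time:
--       building_1_indices.append(i)
--   # Count the number of buildings with the shortest production time
--   building_2_count = len(building_1_indices)
--   return building_1_indices, building_2_count
-- ===== SOURCE B (Python) =====
-- def calculate_building_ratio(production_times):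
--   """Calculates building ratio based on production times."""
--   # Group indices by their time value in one pass.
--   table = {}
--   for i, time in enumerate(production_times):
--     table[time] = table.get(time, []) + [i]
--   shortest = min(table)
--   building_1_indices = table[shortest]
--   return building_1_indices, len(building_1_indices)
-- ===== Notes on version B (the rewrite author's own statement) =====
-- stated objective: alternative
-- what changed: B replaces min()-then-filter (two scans of the list) by one grouping pass building a dict from time value to its index list, then takes min over the dict keys and looks the index list up.
-- outside the precondition, e.g. on calculate_building_ratio([]): A raises ValueError, B raises ValueError
import Mathlib
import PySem

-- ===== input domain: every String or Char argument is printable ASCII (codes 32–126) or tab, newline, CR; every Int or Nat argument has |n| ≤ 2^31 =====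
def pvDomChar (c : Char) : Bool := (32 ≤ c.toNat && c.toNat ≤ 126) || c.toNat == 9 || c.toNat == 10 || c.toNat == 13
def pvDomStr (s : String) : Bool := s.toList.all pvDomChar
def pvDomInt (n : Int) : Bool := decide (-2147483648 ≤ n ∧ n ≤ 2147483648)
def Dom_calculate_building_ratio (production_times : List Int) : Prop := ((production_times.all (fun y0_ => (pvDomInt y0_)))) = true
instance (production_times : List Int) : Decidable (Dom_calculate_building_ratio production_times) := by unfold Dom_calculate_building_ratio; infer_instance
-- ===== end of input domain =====

-- B groups indices by time value in one dict-building pass, then looks up the minimal key; simpler single grouping pass instead of min()+filter rescan.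

-- ===== PORT A =====
def calculate_building_ratio (production_times : List Int) : List Int × Int :=
  match PySem.List.min? production_times (fun t => t) with
  | none => ([], 0)  -- unreachable: Pre_ excludes the empty list, where Python's min raises ValueError
  | some shortest_time =>
    let building_1_indices :=
      (PySem.List.enumerate production_times).foldl
        (fun acc p => if p.2 == shortest_time then acc ++ [p.1] else acc) []
    (building_1_indices, (building_1_indices.length : Int))

-- ===== PORT B =====
def calculate_building_ratio_alt (production_times : List Int) : List Int × Int :=
  let table :=
    (PySem.List.enumerate production_times).foldl
      (fun d p => d.modify p.2 ([] : List Int) (fun l => l ++ [p.1])) PySem.Dict.empty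
  match PySem.List.min? table.keys (fun k => k) with
  | none => ([], 0)  -- unreachable: empty dict, Python's min raises ValueError
  | some shortest =>
    let building_1_indices := table.getD shortest []
    (building_1_indices, (building_1_indices.length : Int))

-- ===== PRECONDITION & SPEC =====
-- Pre_ excludes exactly the empty list, on which both A and B raise ValueError (min of an empty sequence).
def Pre_calculate_building_ratio (production_times : List Int) : Prop := production_times ≠ []
instance (production_times : List Int) : Decidable (Pre_calculate_building_ratio production_times) := by unfold Pre_calculate_building_ratio; infer_instance
def pvWitness_calculate_building_ratio : List Int := [3, 1, 2, 1]

def Spec_calculate_building_ratio (production_times : List Int) (out : List Int × Int) : Prop := out = calculate_building_ratio_alt production_times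
instance (production_times : List Int) (out : List Int × Int) : Decidable (Spec_calculate_building_ratio production_times out) := by unfold Spec_calculate_building_ratio; infer_instance

-- ===== CLAIM (what is proved, stated in full; the proofs are below) =====
def Claim_equal_calculate_building_ratio : Prop := ∀ (production_times : List Int), Dom_calculate_building_ratio production_times → Pre_calculate_building_ratio production_times → Spec_calculate_building_ratio production_times (calculate_building_ratio production_times)

-- ===== LEMMAS AND PROOFS =====

-- min over any list with the same members (both nonempty) is the same value, for the identity key on Int
theorem min?_id_congr (l₁ l₂ : List Int) (h₁ : l₁ ≠ []) (h₂ : l₂ ≠ [])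
    (hm : ∀ x, x ∈ l₁ ↔ x ∈ l₂) :
    PySem.List.min? l₁ (fun x => x) = PySem.List.min? l₂ (fun x => x) := by
  cases e₁ : PySem.List.min? l₁ (fun x => x) with
  | none => exact absurd ((PySem.List.min?_eq_none_iff l₁ _).mp e₁) h₁
  | some m₁ =>
  cases e₂ : PySem.List.min? l₂ (fun x => x) with
  | none => exact absurd ((PySem.List.min?_eq_none_iff l₂ _).mp e₂) h₂
  | some m₂ =>
  have hmem₁ := PySem.List.min?_mem e₁
  have hmem₂ := PySem.List.min?_mem e₂
  have h12 : m₁ ≤ m₂ := PySem.List.min?_isMin e₁ m₂ ((hm m₂).mpr hmem₂)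
  have h21 : m₂ ≤ m₁ := PySem.List.min?_isMin e₂ m₁ ((hm m₁).mp hmem₁)
  rw [le_antisymm h12 h21]

-- the grouping table's entry at c is the list of indices whose value is c
theorem table_getD (xs : List Int) (c : Int) :
    ((PySem.List.enumerate xs).foldl
      (fun d p => d.modify p.2 ([] : List Int) (fun l => l ++ [p.1])) PySem.Dict.empty).getD c []
    = ((PySem.List.enumerate xs).filter (fun p => p.2 == c)).map (·.1) := by
  have := PySem.Dict.getD_foldl_modify_append
    (l := (PySem.List.enumerate xs).map (fun p => (p.2, p.1)))
    (d := PySem.Dict.empty) (c := c)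
  simpa [List.foldl_map, List.filter_map, List.map_map, Function.comp] using this

-- the grouping table's keys have exactly the list's values as members
theorem table_keys_mem (xs : List Int) (x : Int) :
    x ∈ ((PySem.List.enumerate xs).foldl
      (fun d p => d.modify p.2 ([] : List Int) (fun l => l ++ [p.1])) PySem.Dict.empty).keys
    ↔ x ∈ xs := by
  rw [PySem.Dict.keys_foldl_modify_key]
  rw [PySem.Set.mem_update]
  simp [PySem.List.map_snd_enumerate, PySem.Dict.keys_empty]

-- ===== VERDICT (by name: the statement is the Claim_ definition above) =====
theorem calculate_building_ratio_spec : Claim_equal_calculate_building_ratio := by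
  intro xs _ hpre
  unfold Spec_calculate_building_ratio calculate_building_ratio calculate_building_ratio_alt
  have hkeys_ne : ((PySem.List.enumerate xs).foldl
      (fun d p => d.modify p.2 ([] : List Int) (fun l => l ++ [p.1])) PySem.Dict.empty).keys ≠ [] := by
    intro h
    obtain ⟨x, xs', rfl⟩ := List.exists_cons_of_ne_nil hpre
    have := (table_keys_mem (x :: xs') x).mpr (by simp)
    rw [h] at this
    simp at this
  have hmin : PySem.List.min? xs (fun t => t)
      = PySem.List.min? ((PySem.List.enumerate xs).foldl
          (fun d p => d.modify p.2 ([] : List Int) (fun l => l ++ [p.1])) PySem.Dict.empty).keys (fun k => k) :=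
    min?_id_congr _ _ hpre hkeys_ne (fun x => (table_keys_mem xs x).symm)
  simp only [← hmin]
  cases e : PySem.List.min? xs (fun t => t) with
  | none => rfl
  | some m =>
    simp only [PySem.List.foldl_append_if, List.nil_append, table_getD]
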